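-- pv_equiv track=rewrite | github.com/jayjagtap/CodeJam2021 | p2_CodyJamal.py | optimize_cost
-- ===== SOURCE A (Python) =====
-- def optimize_cost(x, y, mural):
--     """
--     CJ: Cody Jamal pays X
--     JC: Cody Jamal pays Y
--     """
--     cost_dict = {"CJ": x, "JC": y}
--
--     total_cost = 0
--     left =0
--     right =0
--     size = len(mural)
--
--     previous = 'X'
--     for i in range(size):
--         if previous == 'J' and mural[i] == 'C':
--             total_cost += cost_dict["JC"]
--         elif previous == 'C' and mural[i] == 'J':
--             total_cost += cost_dict["CJ"]
--
--         if mural[i] != '?':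
--             previous = mural[i]
--
--     return total_cost
-- ===== SOURCE B (Python) =====
-- def optimize_cost(x, y, mural):
--     painted = mural.replace('?', '')
--     return x * painted.count('CJ') + y * painted.count('JC')
-- ===== Notes on version B (the rewrite author's own statement) =====
-- stated objective: simpler
-- what changed: Replaces the stateful index loop tracking a 'previous' character with a loop-free formulation: delete '?' with str.replace, then return x and y times the substring counts of 'CJ' and 'JC' (correct because neither two-character pattern can overlap itself, so non-overlapping str.count equals the number of adjacent pairs).
import Mathlib
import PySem

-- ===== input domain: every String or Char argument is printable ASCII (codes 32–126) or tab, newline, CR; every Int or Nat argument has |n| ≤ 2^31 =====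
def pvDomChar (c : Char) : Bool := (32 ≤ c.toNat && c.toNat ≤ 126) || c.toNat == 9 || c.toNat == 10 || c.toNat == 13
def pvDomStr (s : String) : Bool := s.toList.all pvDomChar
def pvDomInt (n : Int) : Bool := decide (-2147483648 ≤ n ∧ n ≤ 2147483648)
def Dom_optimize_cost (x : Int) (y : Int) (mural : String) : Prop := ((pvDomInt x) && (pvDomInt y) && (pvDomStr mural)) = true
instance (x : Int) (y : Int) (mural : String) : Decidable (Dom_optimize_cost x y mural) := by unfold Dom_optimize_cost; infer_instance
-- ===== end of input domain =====

-- B replaces A's stateful 'previous'-tracking index loop by a loop-free formulation: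
-- delete '?' with str.replace, then x and y times the substring counts of 'CJ' and 'JC'
-- (objective: simpler).

-- ===== PORT A =====
-- A's index loop with state (total_cost, previous); mural[i] via pyGetD (indices are in range).
def optimize_cost (x : Int) (y : Int) (mural : String) : Int :=
  let costCJ := x   -- cost_dict["CJ"]
  let costJC := y   -- cost_dict["JC"]
  let size : Int := (mural.toList.length : Int)
  let st := (PySem.List.pyRange 0 size 1).foldl
    (fun (s : Int × Char) i =>
      let c := PySem.List.pyGetD mural.toList i ' '
      let total := if s.2 = 'J' ∧ c = 'C' then s.1 + costJC
                   else if s.2 = 'C' ∧ c = 'J' then s.1 + costCJ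
                   else s.1
      let prev := if c ≠ '?' then c else s.2
      (total, prev)) ((0 : Int), 'X')
  st.1

-- ===== PORT B =====
def optimize_cost_alt (x : Int) (y : Int) (mural : String) : Int :=
  let painted := PySem.Str.replace mural "?" ""
  x * (PySem.Str.count painted "CJ" : Int) + y * (PySem.Str.count painted "JC" : Int)

-- ===== PRECONDITION & SPEC =====
def Spec_optimize_cost (x : Int) (y : Int) (mural : String) (out : Int) : Prop := out = optimize_cost_alt x y mural
instance (x : Int) (y : Int) (mural : String) (out : Int) : Decidable (Spec_optimize_cost x y mural out) := by unfold Spec_optimize_cost; infer_instance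

-- ===== CLAIM (what is proved, stated in full; the proofs are below) =====
def Claim_equal_optimize_cost : Prop := ∀ (x : Int) (y : Int) (mural : String), Dom_optimize_cost x y mural → Spec_optimize_cost x y mural (optimize_cost x y mural)

-- ===== LEMMAS AND PROOFS =====

-- A's per-character step (after collapsing the index loop to the character list).
def pvStepA (x y : Int) (s : Int × Char) (c : Char) : Int × Char :=
  let total := if s.2 = 'J' ∧ c = 'C' then s.1 + y
               else if s.2 = 'C' ∧ c = 'J' then s.1 + x
               else s.1
  let prev := if c ≠ '?' then c else s.2
  (total, prev)

-- number of adjacent (p, q) pairs in a character list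
def pvPairs (p q : Char) : List Char → Nat
  | a :: b :: t => (if a = p ∧ b = q then 1 else 0) + pvPairs p q (b :: t)
  | _ => 0

lemma pvA_eq_fold (x y : Int) (mural : String) :
    optimize_cost x y mural = (mural.toList.foldl (pvStepA x y) ((0 : Int), 'X')).1 := by
  exact congrArg Prod.fst
    (PySem.List.foldl_pyRange_zero_pyGetD' (xs := mural.toList) (d := ' ')
      (f := pvStepA x y) (init := ((0 : Int), 'X')))

lemma pvPairs_cons_skip (p q : Char) (a : Char) (l : List Char)
    (ha : ¬ (a = p ∧ (l.headD ' ') = q) ∨ l = []) :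
    pvPairs p q (a :: l) = pvPairs p q l := by
  cases l with
  | nil => simp [pvPairs]
  | cons b t =>
    rcases ha with h | h
    · simp only [pvPairs, List.headD] at *
      simp [h]
    · exact absurd h (by simp)

-- A's loop computes x·(#CJ pairs) + y·(#JC pairs) over prev :: (filtered tail).
lemma pvLoopA (x y : Int) (l : List Char) : ∀ (t : Int) (p : Char),
    (l.foldl (pvStepA x y) (t, p)).1 =
      t + x * (pvPairs 'C' 'J' (p :: l.filter (fun c => c ≠ '?')) : Int)
        + y * (pvPairs 'J' 'C' (p :: l.filter (fun c => c ≠ '?')) : Int) := by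
  induction l with
  | nil => intro t p; simp [pvPairs]
  | cons c l ih =>
    intro t p
    by_cases hc : c = '?'
    · subst hc
      have hstep : pvStepA x y (t, p) '?' = (t, p) := by
        simp [pvStepA, (by decide : ('?' : Char) ≠ 'C'), (by decide : ('?' : Char) ≠ 'J')]
      simp only [List.foldl_cons]
      rw [hstep, ih t p, List.filter_cons_of_neg (by simp)]
    · have hstep : pvStepA x y (t, p) c =
          ((t + (if p = 'C' ∧ c = 'J' then x else 0) + (if p = 'J' ∧ c = 'C' then y else 0)), c) := by
        simp only [pvStepA]
        rw [Prod.mk.injEq]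
        refine ⟨?_, by simp [hc]⟩
        by_cases h1 : p = 'J' ∧ c = 'C'
        · have h2 : ¬ (p = 'C' ∧ c = 'J') := by
            rintro ⟨hp, -⟩; rw [hp] at h1; exact absurd h1.1 (by decide)
          simp [h1]
        · by_cases h2 : p = 'C' ∧ c = 'J'
          · simp [h2]
          · simp [h1, h2]
      simp only [List.foldl_cons]
      rw [hstep, ih, List.filter_cons_of_pos (by simpa using hc)]
      have hCJ : pvPairs 'C' 'J' (p :: c :: l.filter (fun c => c ≠ '?')) =
          (if p = 'C' ∧ c = 'J' then 1 else 0) + pvPairs 'C' 'J' (c :: l.filter (fun c => c ≠ '?')) := rfl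
      have hJC : pvPairs 'J' 'C' (p :: c :: l.filter (fun c => c ≠ '?')) =
          (if p = 'J' ∧ c = 'C' then 1 else 0) + pvPairs 'J' 'C' (c :: l.filter (fun c => c ≠ '?')) := rfl
      rw [hCJ, hJC]
      push_cast
      split_ifs <;> ring

-- the sentinel 'X' never forms a pair with 'C' or 'J'
lemma pvPairs_X (p q : Char) (hp : p = 'C' ∨ p = 'J') (ks : List Char) :
    pvPairs p q ('X' :: ks) = pvPairs p q ks := by
  apply pvPairs_cons_skip
  cases ks with
  | nil => right; rfl
  | cons b t =>
    left
    rintro ⟨hX, -⟩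
    rcases hp with h | h <;> (rw [h] at hX; exact absurd hX (by decide))

-- replace '?' → '' is filter
lemma pvReplaceGo (l acc : List Char) : ∀ fuel, l.length ≤ fuel →
    PySem.Chars.replace.go ['?'] [] fuel l acc = acc.reverse ++ l.filter (fun c => c ≠ '?') := by
  induction l generalizing acc with
  | nil =>
    intro fuel _
    cases fuel <;> simp [PySem.Chars.replace.go]
  | cons c t ih =>
    intro fuel hf
    cases fuel with
    | zero => simp at hf
    | succ fuel =>
      by_cases hc : c = '?'
      · subst hc
        have hstep : PySem.Chars.replace.go ['?'] [] (fuel + 1) ('?' :: t) acc =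
            PySem.Chars.replace.go ['?'] [] fuel t acc := by
          simp [PySem.Chars.replace.go]
        rw [hstep, ih acc fuel (by simpa using hf), List.filter_cons_of_neg (by simp)]
      · have hstep : PySem.Chars.replace.go ['?'] [] (fuel + 1) (c :: t) acc =
            PySem.Chars.replace.go ['?'] [] fuel t (c :: acc) := by
          simp only [PySem.Chars.replace.go]
          rw [if_neg (by simp [List.isPrefixOf]; exact fun h => hc h.symm)]
        rw [hstep, ih (c :: acc) fuel (by simpa using hf),
          List.filter_cons_of_pos (by simpa using hc)]
        simp

lemma pvReplace_eq_filter (l : List Char) :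
    PySem.Chars.replace l ['?'] [] = l.filter (fun c => c ≠ '?') := by
  have : ¬ (['?'] : List Char).isEmpty = true := by decide
  simp only [PySem.Chars.replace, this]
  simpa using pvReplaceGo l [] l.length le_rfl

-- non-overlapping count of a 2-character pattern p≠q is the adjacent-pair count
lemma pvCountGo (p q : Char) (hpq : p ≠ q) : ∀ (fuel : ℕ) (l : List Char) (acc : ℕ),
    l.length ≤ fuel →
    PySem.Chars.count.go [p, q] fuel l acc = acc + pvPairs p q l := by
  intro fuel
  induction fuel with
  | zero =>
    intro l acc hf
    have hl : l = [] := List.eq_nil_of_length_eq_zero (Nat.le_zero.mp hf)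
    subst hl
    simp [PySem.Chars.count.go, pvPairs]
  | succ fuel ih =>
    intro l acc hf
    cases l with
    | nil => simp [PySem.Chars.count.go, pvPairs]
    | cons c t =>
      by_cases hpre : ([p, q] : List Char).isPrefixOf (c :: t) = true
      · obtain ⟨hc, b, t', hb, ht⟩ : c = p ∧ ∃ b t', b = q ∧ t = b :: t' := by
          cases t with
          | nil => simp [List.isPrefixOf] at hpre
          | cons b t' =>
            simp only [List.isPrefixOf, Bool.and_eq_true, beq_iff_eq] at hpre
            exact ⟨hpre.1.symm, b, t', hpre.2.1.symm, rfl⟩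
        subst hc hb ht
        have hstep : PySem.Chars.count.go [c, b] (fuel + 1) (c :: b :: t') acc =
            PySem.Chars.count.go [c, b] fuel t' (acc + 1) := by
          simp [PySem.Chars.count.go, hpre]
        rw [hstep, ih t' (acc + 1) (by simp at hf ⊢; omega)]
        have h1 : pvPairs c b (c :: b :: t') = 1 + pvPairs c b (b :: t') := by
          simp [pvPairs]
        have h2 : pvPairs c b (b :: t') = pvPairs c b t' := by
          apply pvPairs_cons_skip
          cases t' with
          | nil => right; rfl
          | cons _ _ => left; rintro ⟨h, -⟩; exact hpq h.symm
        rw [h1, h2]; omega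
      · have hstep : PySem.Chars.count.go [p, q] (fuel + 1) (c :: t) acc =
            PySem.Chars.count.go [p, q] fuel t acc := by
          simp only [PySem.Chars.count.go]
          rw [if_neg hpre]
        rw [hstep, ih t acc (by simp at hf ⊢; omega)]
        congr 1
        symm
        apply pvPairs_cons_skip
        cases t with
        | nil => right; rfl
        | cons b t' =>
          left
          rintro ⟨hc, hb⟩
          apply hpre
          simp only [List.headD] at hb
          simp [List.isPrefixOf, hc, hb]

lemma pvCount_eq_pairs (p q : Char) (hpq : p ≠ q) (l : List Char) :
    PySem.Chars.count l [p, q] = pvPairs p q l := by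
  have : ¬ ([p, q] : List Char).isEmpty = true := by simp
  simp only [PySem.Chars.count, this]
  simpa using pvCountGo p q hpq l.length l 0 le_rfl

-- ===== VERDICT (by name: the statement is the Claim_ definition above) =====
theorem optimize_cost_spec : Claim_equal_optimize_cost := by
  intro x y mural _
  unfold Spec_optimize_cost optimize_cost_alt
  rw [pvA_eq_fold, pvLoopA]
  have hrep : (PySem.Str.replace mural "?" "").toList =
      mural.toList.filter (fun c => c ≠ '?') := by
    simp only [PySem.Str.replace]
    rw [show ("?" : String).toList = ['?'] from rfl, show ("" : String).toList = [] from rfl,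
      pvReplace_eq_filter]
    simp
  simp only [PySem.Str.count, hrep]
  rw [show ("CJ" : String).toList = ['C', 'J'] from rfl,
    show ("JC" : String).toList = ['J', 'C'] from rfl,
    pvCount_eq_pairs 'C' 'J' (by decide), pvCount_eq_pairs 'J' 'C' (by decide),
    pvPairs_X 'C' 'J' (Or.inl rfl), pvPairs_X 'J' 'C' (Or.inr rfl)]
  ring
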